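-- pv_equiv track=rewrite | github.com/miliar/Code_Jam_Webscraper | solutions_python/Problem_178/2998.py | rever
-- ===== SOURCE A (Python) =====
-- def rever(list):
--     item = list[0]
--     l=len(list)-1
--     i=0
--     while i <= l:
--         if list[i] == item:
--             i = i+1
--         else:
--             break
--     l=0
--     while l<i:
--         if list[l] == "+":
--             list[l] = "-"
--         else:
--             list[l] = "+"
--         l = l+1
--
--     return list
-- ===== SOURCE B (Python) =====
-- def rever(list):
--     item = list[0]
--     flip = "-" if item == "+" else "+"
--     i = 0
--     while i < len(list) and list[i] == item:
--         list[i] = flip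
--         i = i + 1
--     return list
-- ===== Notes on version B (the rewrite author's own statement) =====
-- stated objective: simpler
-- what changed: B fuses A's two sequential loops (find prefix length, then rewrite) into a single pass that derives the flipped value once from the first element and writes it while scanning the equal prefix.
import Mathlib
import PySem

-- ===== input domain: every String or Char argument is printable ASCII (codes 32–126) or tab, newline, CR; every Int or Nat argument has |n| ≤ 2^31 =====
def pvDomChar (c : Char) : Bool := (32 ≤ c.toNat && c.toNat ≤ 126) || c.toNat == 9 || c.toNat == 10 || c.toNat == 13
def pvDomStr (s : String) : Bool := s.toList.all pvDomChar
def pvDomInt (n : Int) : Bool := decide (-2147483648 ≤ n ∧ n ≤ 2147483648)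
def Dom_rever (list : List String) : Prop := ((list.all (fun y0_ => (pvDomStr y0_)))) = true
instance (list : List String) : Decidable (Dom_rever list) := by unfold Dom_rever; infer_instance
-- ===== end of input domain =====

-- ===== PORT A =====
-- A finds i = length of the maximal prefix equal to list[0] (first while loop),
-- then a second loop rewrites positions 0..i-1 to "-" if "+" else "+".
-- (Both Pythons mutate the argument in place; the equivalence here is about the return value.)
def reverCount (item : String) : List String → Nat
  | [] => 0
  | x :: xs => if x == item then reverCount item xs + 1 else 0

def reverRewrite : Nat → List String → List String
  | 0, xs => xs
  | _ + 1, [] => []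
  | n + 1, x :: xs => (if x == "+" then "-" else "+") :: reverRewrite n xs

def rever (list : List String) : List String :=
  match PySem.List.pyGet? list 0 with
  | none => []   -- list[0] raises IndexError; excluded by Pre_rever
  | some item => reverRewrite (reverCount item list) list

-- ===== PORT B =====
def reverFlip (item flip : String) : List String → List String
  | [] => []
  | x :: xs => if x == item then flip :: reverFlip item flip xs else x :: xs

def rever_alt (list : List String) : List String :=
  match PySem.List.pyGet? list 0 with
  | none => []   -- list[0] raises IndexError; excluded by Pre_rever
  | some item => reverFlip item (if item == "+" then "-" else "+") list

-- ===== PRECONDITION & SPEC =====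
-- A raises IndexError on the empty list (list[0]); Pre_ excludes exactly that.
def Pre_rever (list : List String) : Prop := list ≠ []
instance (list : List String) : Decidable (Pre_rever list) := by unfold Pre_rever; infer_instance
def pvWitness_rever : List String := ["+", "+", "-"]
def Spec_rever (list : List String) (out : List String) : Prop := out = rever_alt list
instance (list : List String) (out : List String) : Decidable (Spec_rever list out) := by unfold Spec_rever; infer_instance

-- ===== CLAIM (what is proved, stated in full; the proofs are below) =====
def Claim_equal_rever : Prop := ∀ (list : List String), Dom_rever list → Pre_rever list → Spec_rever list (rever list)

-- ===== LEMMAS AND PROOFS =====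
lemma rewrite_eq_flip (item : String) (l : List String) :
    reverRewrite (reverCount item l) l = reverFlip item (if item == "+" then "-" else "+") l := by
  induction l with
  | nil => simp [reverCount, reverRewrite, reverFlip]
  | cons x xs ih =>
    by_cases hx : x == item
    · have hxi : x = item := by simpa using hx
      simp [reverCount, reverRewrite, reverFlip, hxi, ih]
    · simp [reverCount, reverRewrite, reverFlip, hx]

-- ===== VERDICT (by name: the statement is the Claim_ definition above) =====
theorem rever_spec : Claim_equal_rever := by
  intro list _ hpre
  unfold Spec_rever rever rever_alt
  cases list with
  | nil => exact absurd rfl hpre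
  | cons x xs =>
    simp [PySem.List.pyGet?, PySem.List.pyIdx?, rewrite_eq_flip]
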